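-- pv_equiv track=rewrite | github.com/RawwBear/WDI | Zestaw_2/08.py | disconti_num_fibo
-- ===== SOURCE A (Python) =====
-- def disconti_num_fibo(num):
--     f1, f2 = 1, 1
--     suma = 2
--     fibo = [f1, f2]
--     while f2 < num and suma < num:
--         f1, f2 = f2, f1+f2
--         suma += f2
--         fibo.append(f2)
--     idx = 0
--     while suma > num:
--         suma -= fibo[idx]
--         idx += 1
--     if suma != num:
--         return False
--     return True
-- ===== SOURCE B (Python) =====
-- def disconti_num_fibo(num):
--     f1, f2 = 1, 1
--     suma = 2
--     fibo = [f1, f2]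
--     while f2 < num and suma < num:
--         f1, f2 = f2, f1 + f2
--         suma += f2
--         fibo.append(f2)
--     acc = 0
--     if acc == num:
--         return True
--     for x in reversed(fibo):
--         acc += x
--         if acc == num:
--             return True
--     return False
-- ===== Notes on version B (the rewrite author's own statement) =====
-- stated objective: alternative
-- what changed: The second phase's front-removal loop (indexing fibo[idx] and subtracting while suma > num) is replaced by a single back-to-front accumulation that checks whether any suffix sum (including the empty one, 0) equals num.
import Mathlib
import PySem

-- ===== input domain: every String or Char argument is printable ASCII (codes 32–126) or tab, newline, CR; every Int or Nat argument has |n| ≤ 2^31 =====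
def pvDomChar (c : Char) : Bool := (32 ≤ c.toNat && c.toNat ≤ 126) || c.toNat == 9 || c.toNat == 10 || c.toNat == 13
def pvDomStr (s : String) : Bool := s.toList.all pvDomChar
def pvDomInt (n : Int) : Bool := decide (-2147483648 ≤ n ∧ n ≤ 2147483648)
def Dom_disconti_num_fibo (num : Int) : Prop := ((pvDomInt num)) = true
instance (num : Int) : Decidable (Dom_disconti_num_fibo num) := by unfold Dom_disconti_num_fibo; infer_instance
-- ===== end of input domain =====

-- B replaces A's front-removal index loop with one reverse suffix-sum accumulation pass (alternative decomposition, same cost).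

-- ===== PORT A =====
-- first while loop of A; the fuel num.toNat only makes the recursion total and is ample (suma grows by ≥ 2 per iteration)
def fibBuild (num : Int) : Int → Int → Int → List Int → Nat → Int × List Int
  | _, _, suma, fibo, 0 => (suma, fibo)
  | f1, f2, suma, fibo, fuel+1 =>
    if f2 < num ∧ suma < num then
      fibBuild num f2 (f1 + f2) (suma + (f1 + f2)) (fibo ++ [f1 + f2]) fuel
    else (suma, fibo)

-- second while loop of A: 'while suma > num: suma -= fibo[idx]; idx += 1';  none = IndexError
def drainLoop (num : Int) (fibo : List Int) (suma : Int) (idx : Nat) : Option Int :=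
  if num < suma then
    match h : PySem.List.pyGet? fibo (idx : Int) with
    | none => none
    | some v => drainLoop num fibo (suma - v) (idx + 1)
  else some suma
termination_by fibo.length - idx
decreasing_by
  rw [PySem.List.pyGet?_natCast] at h
  have := (List.getElem?_eq_some_iff.mp h).1
  omega

def disconti_num_fibo (num : Int) : Bool :=
  let r := fibBuild num 1 1 2 [1, 1] num.toNat
  match drainLoop num r.2 r.1 0 with
  | none => false  -- IndexError; excluded by Pre_
  | some s => if s ≠ num then false else true

-- ===== PORT B =====
-- same first loop as A (B keeps it verbatim)
def fibBuildB (num : Int) : Int → Int → Int → List Int → Nat → Int × List Int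
  | _, _, suma, fibo, 0 => (suma, fibo)
  | f1, f2, suma, fibo, fuel+1 =>
    if f2 < num ∧ suma < num then
      fibBuildB num f2 (f1 + f2) (suma + (f1 + f2)) (fibo ++ [f1 + f2]) fuel
    else (suma, fibo)

-- 'for x in reversed(fibo): acc += x; if acc == num: return True' (the argument is fibo.reverse)
def suffixCheck (num : Int) : Int → List Int → Bool
  | _, [] => false
  | acc, x :: rest => if acc + x = num then true else suffixCheck num (acc + x) rest

def disconti_num_fibo_alt (num : Int) : Bool :=
  let r := fibBuildB num 1 1 2 [1, 1] num.toNat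
  if (0 : Int) = num then true else suffixCheck num 0 r.2.reverse

-- ===== PRECONDITION & SPEC =====
-- A raises IndexError for every num < 0 (the removal loop runs past the end of fibo); Pre_ excludes exactly those.
def Pre_disconti_num_fibo (num : Int) : Prop := 0 ≤ num
instance (num : Int) : Decidable (Pre_disconti_num_fibo num) := by unfold Pre_disconti_num_fibo; infer_instance
def pvWitness_disconti_num_fibo : Int := (10)

def Spec_disconti_num_fibo (num : Int) (out : Bool) : Prop := out = disconti_num_fibo_alt num
instance (num : Int) (out : Bool) : Decidable (Spec_disconti_num_fibo num out) := by unfold Spec_disconti_num_fibo; infer_instance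

-- ===== CLAIM (what is proved, stated in full; the proofs are below) =====
def Claim_equal_disconti_num_fibo : Prop := ∀ (num : Int), Dom_disconti_num_fibo num → Pre_disconti_num_fibo num → Spec_disconti_num_fibo num (disconti_num_fibo num)

-- ===== LEMMAS AND PROOFS =====

theorem fibBuildB_eq (num : Int) (f1 f2 suma : Int) (fibo : List Int) (fuel : Nat) :
    fibBuildB num f1 f2 suma fibo fuel = fibBuild num f1 f2 suma fibo fuel := by
  induction fuel generalizing f1 f2 suma fibo with
  | zero => rfl
  | succ n ih =>
    simp only [fibBuild, fibBuildB]
    split_ifs with h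
    · exact ih f2 (f1 + f2) (suma + (f1 + f2)) (fibo ++ [f1 + f2])
    · rfl

theorem fibBuild_inv (num : Int) (f1 f2 suma : Int) (fibo : List Int) (fuel : Nat)
    (h1 : 0 < f1) (h2 : 0 < f2) (hs : suma = fibo.sum) (hp : ∀ x ∈ fibo, 0 < x) :
    (fibBuild num f1 f2 suma fibo fuel).1 = (fibBuild num f1 f2 suma fibo fuel).2.sum ∧
      (∀ x ∈ (fibBuild num f1 f2 suma fibo fuel).2, 0 < x) := by
  induction fuel generalizing f1 f2 suma fibo with
  | zero => exact ⟨hs, hp⟩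
  | succ n ih =>
    simp only [fibBuild]
    split_ifs with h
    · refine ih f2 (f1 + f2) (suma + (f1 + f2)) (fibo ++ [f1 + f2]) h2 (by omega) ?_ ?_
      · simp [hs]
      · intro x hx
        rcases List.mem_append.mp hx with hx | hx
        · exact hp x hx
        · simp only [List.mem_singleton] at hx; omega
    · exact ⟨hs, hp⟩

-- structural version of A's removal loop, used only in the proofs
def drainAux (num : Int) : List Int → Int → Option Int
  | [], s => if num < s then none else some s
  | x :: r, s => if num < s then drainAux num r (s - x) else some s

theorem drainLoop_eq (num : Int) (fibo : List Int) (suma : Int) (idx : Nat) :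
    drainLoop num fibo suma idx = drainAux num (fibo.drop idx) suma := by
  induction suma, idx using drainLoop.induct num fibo with
  | case1 suma idx hlt hnone =>
    rw [drainLoop, if_pos hlt]
    split
    next heq =>
      rw [PySem.List.pyGet?_natCast] at hnone
      have hle : fibo.length ≤ idx := List.getElem?_eq_none_iff.mp hnone
      rw [List.drop_eq_nil_of_le hle]
      simp [drainAux, hlt]
    next v heq => rw [hnone] at heq; cases heq
  | case2 suma idx hlt v hsome ih =>
    rw [drainLoop, if_pos hlt]
    split
    next heq => rw [hsome] at heq; cases heq
    next w heq =>
      rw [hsome] at heq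
      injection heq with hw
      subst hw
      have hv := hsome
      rw [PySem.List.pyGet?_natCast] at hv
      obtain ⟨hidx, hvv⟩ := List.getElem?_eq_some_iff.mp hv
      rw [List.drop_eq_getElem_cons hidx]
      simp only [drainAux, if_pos hlt, hvv]
      exact ih
  | case3 suma idx hlt =>
    rw [drainLoop, if_neg hlt]
    cases fibo.drop idx <;> simp [drainAux, hlt]

theorem sum_drop_le (l : List Int) (k : Nat) (hp : ∀ x ∈ l, 0 < x) : (l.drop k).sum ≤ l.sum := by
  have h1 : 0 ≤ (l.take k).sum := by
    apply List.sum_nonneg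
    intro x hx
    exact le_of_lt (hp x (List.mem_of_mem_take hx))
  calc (l.drop k).sum ≤ (l.take k).sum + (l.drop k).sum := by linarith
    _ = l.sum := by rw [← List.sum_append, List.take_append_drop]

theorem Achar (num : Int) (h0 : 0 ≤ num) (l : List Int) (hp : ∀ x ∈ l, 0 < x) :
    (match drainAux num l l.sum with
     | none => false
     | some s => if s ≠ num then false else true) = true
      ↔ ∃ k, k ≤ l.length ∧ (l.drop k).sum = num := by
  induction l with
  | nil =>
    simp only [drainAux, List.sum_nil, List.length_nil]
    rw [if_neg (by omega)]
    by_cases h : (0 : Int) = num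
    · simp only [if_neg (by omega : ¬ ((0:Int) ≠ num)), true_iff]
      exact ⟨0, Nat.le_refl _, by simpa using h⟩
    · simp only [if_pos h, Bool.false_eq_true, false_iff]
      rintro ⟨k, -, hk⟩
      exact h (by simpa using hk)
  | cons x r ih =>
    have hpr : ∀ y ∈ r, 0 < y := fun y hy => hp y (List.mem_cons_of_mem x hy)
    simp only [drainAux, List.sum_cons]
    split_ifs with hlt
    · have hrw : x + r.sum - x = r.sum := by ring
      rw [hrw, ih hpr]
      constructor
      · rintro ⟨k, hk, hs⟩
        refine ⟨k + 1, by simp; omega, ?_⟩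
        simpa using hs
      · rintro ⟨k, hk, hs⟩
        cases k with
        | zero =>
          exfalso
          simp only [List.drop_zero, List.sum_cons] at hs
          rw [hs] at hlt
          exact lt_irrefl num hlt
        | succ j =>
          refine ⟨j, by simp at hk; omega, ?_⟩
          simpa using hs
    · by_cases he : x + r.sum = num
      · constructor
        · intro _
          exact ⟨0, Nat.zero_le _, by simpa using he⟩
        · intro _
          simp [he]
      · constructor
        · intro hcontra
          simp [he] at hcontra
        · rintro ⟨k, hk, hs⟩
          exfalso
          have hle := sum_drop_le (x :: r) k hp
          rw [hs] at hle
          simp only [List.sum_cons] at hle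
          exact he (le_antisymm (not_lt.mp hlt) hle)

theorem suffixCheck_iff (num : Int) (r : List Int) : ∀ acc : Int,
    suffixCheck num acc r = true ↔ ∃ j, 1 ≤ j ∧ j ≤ r.length ∧ acc + (r.take j).sum = num := by
  induction r with
  | nil =>
    intro acc
    simp only [suffixCheck, List.length_nil, Bool.false_eq_true, false_iff]
    rintro ⟨j, hj1, hj2, -⟩
    omega
  | cons x rest ih =>
    intro acc
    simp only [suffixCheck]
    split_ifs with h
    · constructor
      · intro _
        exact ⟨1, Nat.le_refl _, by simp, by simpa using h⟩
      · intro _; rfl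
    · rw [ih (acc + x)]
      constructor
      · rintro ⟨j, hj1, hj2, hs⟩
        refine ⟨j + 1, by omega, by simp; omega, ?_⟩
        simp only [List.take_succ_cons, List.sum_cons]
        rw [← hs]; ring
      · rintro ⟨j, hj1, hj2, hs⟩
        cases j with
        | zero => omega
        | succ i =>
          cases i with
          | zero =>
            exfalso
            apply h
            simpa using hs
          | succ i2 =>
            refine ⟨i2 + 1, by omega, by simp at hj2 ⊢; omega, ?_⟩
            simp only [List.take_succ_cons, List.sum_cons] at hs ⊢
            rw [← hs]; ring
theorem altIff (num : Int) (l : List Int) :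
    (if (0 : Int) = num then true else suffixCheck num 0 l.reverse) = true
      ↔ ∃ k, k ≤ l.length ∧ (l.drop k).sum = num := by
  have htake : ∀ j : Nat, j ≤ l.length → (l.reverse.take j).sum = (l.drop (l.length - j)).sum := by
    intro j hj
    rw [List.take_reverse, List.sum_reverse]
  split_ifs with h0
  · constructor
    · intro _
      exact ⟨l.length, Nat.le_refl _, by simp [← h0]⟩
    · intro _; rfl
  · rw [suffixCheck_iff]
    constructor
    · rintro ⟨j, hj1, hj2, hs⟩
      rw [List.length_reverse] at hj2
      rw [zero_add, htake j hj2] at hs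
      exact ⟨l.length - j, by omega, hs⟩
    · rintro ⟨k, hk, hs⟩
      have hkne : k ≠ l.length := by
        intro he
        rw [he] at hs
        exact h0 (by simpa using hs)
      refine ⟨l.length - k, by omega, by rw [List.length_reverse]; omega, ?_⟩
      rw [zero_add, htake (l.length - k) (by omega)]
      have h2 : l.length - (l.length - k) = k := by omega
      rw [h2]
      exact hs

-- ===== VERDICT (by name: the statement is the Claim_ definition above) =====
theorem disconti_num_fibo_spec : Claim_equal_disconti_num_fibo := by
  intro num _ hpre
  unfold Spec_disconti_num_fibo
  simp only [disconti_num_fibo, disconti_num_fibo_alt, fibBuildB_eq]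
  have hinv := fibBuild_inv num 1 1 2 [1, 1] num.toNat (by omega) (by omega) (by simp)
    (by intro x hx; simp at hx; omega)
  rw [drainLoop_eq, List.drop_zero, hinv.1]
  rw [Bool.eq_iff_iff, altIff]
  exact Achar num hpre _ hinv.2
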